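-- pv_equiv track=rewrite | github.com/mrajagopal/Practise | NonRepeating/NonRepeating.py | orderNoMatter
-- ===== SOURCE A (Python) =====
-- def orderNoMatter(ss, all=True):
--     # Create a dict {char: counts, ...}
--     dic = {}
--     for c in ss:
--         dic[c] = dic.setdefault(c, 0) + 1
--
--     # A list of characters that appear only once.
--     arr = [key for (key, val) in dic.items() if val == 1]
--
--     # Check if the character in arr is found
--     ret = {}
--     for i in range(len(ss)):
--         if ss[i] in arr:
--             if all == False:
--                 return {i: ss[i]}
--             ret[i] = ss[i]
--
--     return ret
-- ===== SOURCE B (Python) =====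
-- def orderNoMatter(ss, all=True):
--     # One pass: char -> [first_index, count]; then walk the table once.
--     info = {}
--     for i, c in enumerate(ss):
--         if c in info:
--             info[c][1] += 1
--         else:
--             info[c] = [i, 1]
--     ret = {}
--     for c, (idx, cnt) in info.items():
--         if cnt == 1:
--             if all == False:
--                 return {idx: c}
--             ret[idx] = c
--     return ret
-- ===== Notes on version B (the rewrite author's own statement) =====
-- stated objective: alternative
-- what changed: A counts chars, builds the list of singleton chars, then re-scans the whole string index-by-index testing each character for membership in that list; B makes one pass recording each char's first index and count in a dict and then walks that dict's items once, so the second pass over the string and the inner membership scan disappear.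
import Mathlib
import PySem

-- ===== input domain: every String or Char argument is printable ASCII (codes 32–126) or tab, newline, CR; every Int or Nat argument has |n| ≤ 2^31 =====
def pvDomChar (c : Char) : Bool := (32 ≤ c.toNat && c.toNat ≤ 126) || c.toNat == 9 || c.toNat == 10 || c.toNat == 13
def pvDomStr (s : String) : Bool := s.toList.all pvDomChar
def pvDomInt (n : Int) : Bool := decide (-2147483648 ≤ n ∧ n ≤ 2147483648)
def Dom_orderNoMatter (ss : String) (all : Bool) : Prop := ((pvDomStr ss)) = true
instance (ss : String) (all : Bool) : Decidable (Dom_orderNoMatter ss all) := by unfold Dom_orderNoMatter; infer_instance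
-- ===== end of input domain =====

-- B replaces A's second pass over the string (with an inner membership scan of the
-- singleton list) by one pass building a char -> (first_index, count) table and a
-- single walk over that table's items; objective: alternative (same measured cost).


-- ===== PORT A =====
-- the 'for i in range(len(ss)): if ss[i] in arr: …' loop, with its early return for all == False
def orderNoMatterLoop (arr : List Char) (all : Bool) :
    List (Int × Char) → PySem.Dict Int String → PySem.Dict Int String
  | [], ret => ret
  | (i, c) :: rest, ret =>
    if c ∈ arr then
      if all = false then PySem.Dict.empty.insert i (String.ofList [c])
      else orderNoMatterLoop arr all rest (ret.insert i (String.ofList [c]))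
    else orderNoMatterLoop arr all rest ret

def orderNoMatter (ss : String) (all : Bool) : List (Int × String) :=
  let L := ss.toList
  -- dic[c] = dic.setdefault(c, 0) + 1
  let dic : PySem.Dict Char Int :=
    L.foldl (fun d c => (d.setdefault c 0).insert c (d.getD c 0 + 1)) PySem.Dict.empty
  -- arr = [key for (key, val) in dic.items() if val == 1]
  let arr : List Char := (dic.items.filter (fun kv => kv.2 == 1)).map (·.1)
  (orderNoMatterLoop arr all (PySem.List.enumerate L 0) PySem.Dict.empty).items

-- ===== PORT B =====
-- the 'for c, (idx, cnt) in info.items(): …' loop, with its early return for all == False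
def orderNoMatterAltLoop (all : Bool) :
    List (Char × (Int × Int)) → PySem.Dict Int String → PySem.Dict Int String
  | [], ret => ret
  | (c, (idx, cnt)) :: rest, ret =>
    if cnt == 1 then
      if all = false then PySem.Dict.empty.insert idx (String.ofList [c])
      else orderNoMatterAltLoop all rest (ret.insert idx (String.ofList [c]))
    else orderNoMatterAltLoop all rest ret

def orderNoMatter_alt (ss : String) (all : Bool) : List (Int × String) :=
  -- info: char -> [first_index, count], one pass over enumerate(ss)
  let info : PySem.Dict Char (Int × Int) :=
    (PySem.List.enumerate ss.toList 0).foldl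
      (fun d p =>
        if d.contains p.2 then d.modify p.2 (0, 0) (fun q => (q.1, q.2 + 1))
        else d.insert p.2 (p.1, 1))
      PySem.Dict.empty
  (orderNoMatterAltLoop all info.items PySem.Dict.empty).items

-- ===== PRECONDITION & SPEC =====
def Spec_orderNoMatter (ss : String) (all : Bool) (out : List (Int × String)) : Prop := out = orderNoMatter_alt ss all
instance (ss : String) (all : Bool) (out : List (Int × String)) : Decidable (Spec_orderNoMatter ss all out) := by unfold Spec_orderNoMatter; infer_instance

-- ===== CLAIM (what is proved, stated in full; the proofs are below) =====
def Claim_equal_orderNoMatter : Prop := ∀ (ss : String) (all : Bool), Dom_orderNoMatter ss all → Spec_orderNoMatter ss all (orderNoMatter ss all)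

-- ===== LEMMAS AND PROOFS =====

-- A's dict-building step is a plain counting insert
theorem stepA_eq (d : PySem.Dict Char Int) (c : Char) :
    (d.setdefault c 0).insert c (d.getD c 0 + 1) = d.insert c (d.getD c 0 + 1) := by
  cases h : d.contains c with
  | true => rw [PySem.Dict.setdefault_of_contains d 0 h]
  | false =>
      rw [PySem.Dict.setdefault_of_not_contains d 0 h, PySem.Dict.insert_insert_self]

theorem dicA_eq (L : List Char) :
    L.foldl (fun d c => (d.setdefault c 0).insert c (d.getD c 0 + 1))
      (PySem.Dict.empty : PySem.Dict Char Int) = PySem.Dict.counter L := by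
  rw [PySem.List.foldl_congr_mem L _ (fun d c => d.insert c (d.getD c 0 + 1))
        PySem.Dict.empty (fun d c _ => stepA_eq d c),
      PySem.Dict.foldl_insert_getD_add_one_eq_counter]

theorem mem_snd_enumerate {α : Type} (L : List α) (n : Int) (p : Int × α)
    (h : p ∈ PySem.List.enumerate L n) : p.2 ∈ L := by
  induction L generalizing n with
  | nil => simp [PySem.List.enumerate] at h
  | cons a t ih =>
      rw [PySem.List.enumerate_cons, List.mem_cons] at h
      rcases h with h | h
      · simp [h]
      · exact List.mem_cons_of_mem a (ih (n + 1) h)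

-- shared second part of both cases of tableB_items
theorem filter_discard_part (t : List Char) (a : Char) (d : PySem.Dict Char (Int × Int)) (n : Int) :
    ((PySem.Set.ofList t).filter (fun c => !((c == a) || d.contains c))).map
        (fun c => (c, (n + 1 + (t.idxOf c : Int), (t.count c : Int))))
    = (((PySem.Set.ofList t).discard a).filter (fun c => !d.contains c)).map
        (fun c => (c, (n + ((a :: t).idxOf c : Int), ((a :: t).count c : Int)))) := by
  simp only [PySem.Set.discard, List.filter_filter]
  have hf : List.filter (fun c => !d.contains c && !(c == a)) (PySem.Set.ofList t)
      = List.filter (fun c => !((c == a) || d.contains c)) (PySem.Set.ofList t) :=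
    List.filter_congr (fun c _ => by
      cases hc : c == a <;> cases hd' : d.contains c <;> simp)
  rw [hf]
  apply List.map_congr_left
  intro c hc
  have hca : (c == a) = false := by
    have := (List.mem_filter.mp hc).2
    cases h : c == a
    · rfl
    · rw [h] at this; simp at this
  have hac : (a == c) = false := by
    cases h : a == c
    · rfl
    · rw [beq_eq_false_iff_ne] at hca; exact absurd (eq_of_beq h).symm hca
  simp only [List.idxOf_cons, hac, cond_false, List.count_cons,
    Nat.cast_add, Nat.cast_one, Prod.mk.injEq]
  refine ⟨trivial, by ring, by simp⟩

theorem tableB_items (L : List Char) (n : Int) (d : PySem.Dict Char (Int × Int))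
    (hnd : d.keys.Nodup) :
    ((PySem.List.enumerate L n).foldl
      (fun d p =>
        if d.contains p.2 then d.modify p.2 (0, 0) (fun q => (q.1, q.2 + 1))
        else d.insert p.2 (p.1, 1)) d).items
    = d.items.map (fun p => (p.1, (p.2.1, p.2.2 + (L.count p.1 : Int))))
      ++ ((PySem.Set.ofList L).filter (fun c => !d.contains c)).map
          (fun c => (c, (n + (L.idxOf c : Int), (L.count c : Int)))) := by
  induction L generalizing n d with
  | nil =>
      simp [PySem.List.enumerate, PySem.Set.ofList, PySem.Set.empty]
  | cons a t ih =>
      rw [PySem.List.enumerate_cons, List.foldl_cons, PySem.Set.ofList_cons,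
        List.filter_cons]
      by_cases h : d.contains a = true
      · have hstep : (if d.contains (n, a).2 = true
              then d.modify (n, a).2 (0, 0) (fun q => (q.1, q.2 + 1))
              else d.insert (n, a).2 ((n, a).1, 1))
            = d.insert a ((d.getD a (0, 0)).1, (d.getD a (0, 0)).2 + 1) := by
          rw [if_pos (show d.contains (n, a).2 = true from h)]; rfl
        rw [hstep, ih (n + 1) _ (PySem.Dict.nodup_keys_insert d a _ hnd),
          PySem.Dict.items_insert_of_contains d _ h, List.map_map,
          if_neg (by simp [h] : ¬ ((!d.contains a) = true))]
        have h2 : ∀ c, (PySem.Dict.insert d a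
            ((d.getD a (0, 0)).1, (d.getD a (0, 0)).2 + 1)).contains c
            = ((c == a) || d.contains c) := fun c => PySem.Dict.contains_insert d a c _
        have h2' : (fun c => !(PySem.Dict.insert d a
            ((d.getD a (0, 0)).1, (d.getD a (0, 0)).2 + 1)).contains c)
            = fun c => !((c == a) || d.contains c) := by
          funext c; rw [h2]
        rw [h2']
        congr 1
        · apply List.map_congr_left
          intro p hp
          by_cases hpa : p.1 = a
          · have hv : d.getD a (0, 0) = p.2 := by
              have hp' : (a, p.2) ∈ d.items := by rw [← hpa]; exact hp
              exact PySem.Dict.getD_of_mem_items d hp' hnd (0, 0)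
            simp [hpa, hv]
            try omega
          · have hb' : (a == p.1) = false := beq_eq_false_iff_ne.mpr (Ne.symm hpa)
            simp [hpa, hb', List.count_cons]
        · exact filter_discard_part t a d n
      · have h' : d.contains a = false := by simpa using h
        have hstep : (if d.contains (n, a).2 = true
              then d.modify (n, a).2 (0, 0) (fun q => (q.1, q.2 + 1))
              else d.insert (n, a).2 ((n, a).1, 1))
            = d.insert a (n, 1) := by
          rw [if_neg (show ¬ d.contains (n, a).2 = true from by simp [h'])]
        rw [hstep, ih (n + 1) _ (PySem.Dict.nodup_keys_insert d a _ hnd),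
          PySem.Dict.items_insert_of_not_contains d _ h', List.map_append,
          if_pos (by simp [h'] : (!d.contains a) = true)]
        have h2' : (fun c => !(PySem.Dict.insert d a (n, 1)).contains c)
            = fun c => !((c == a) || d.contains c) := by
          funext c; rw [PySem.Dict.contains_insert d a c _]
        rw [h2', List.append_assoc]
        congr 1
        · apply List.map_congr_left
          intro p hp
          have hpa : p.1 ≠ a := by
            intro hh
            have hk : p.1 ∈ d.keys := PySem.Dict.mem_keys_of_mem_items d hp
            rw [hh, ← PySem.Dict.contains_iff_mem_keys d a, h'] at hk
            exact Bool.false_ne_true hk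
          have hb' : (a == p.1) = false := beq_eq_false_iff_ne.mpr (Ne.symm hpa)
          simp [List.count_cons, hb']
        · simp only [List.map_cons, List.map_nil, List.singleton_append]
          congr 1
          · simp
            try omega
          · exact filter_discard_part t a d n

-- filtered enumerate = filtered first-occurrence table, for predicates selecting chars
-- that occur at most once
theorem enum_filter_eq (L : List Char) (q : Char → Bool)
    (hq : ∀ c, q c = true → L.count c ≤ 1) (n : Int) :
    (PySem.List.enumerate L n).filter (fun p => q p.2)
    = ((PySem.Set.ofList L).filter q).map (fun c => (n + (L.idxOf c : Int), c)) := by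
  induction L generalizing n with
  | nil => simp [PySem.List.enumerate, PySem.Set.ofList, PySem.Set.empty]
  | cons a t ih =>
      have hq' : ∀ c, q c = true → t.count c ≤ 1 := by
        intro c hc
        have h1 := hq c hc
        rw [List.count_cons] at h1
        omega
      rw [PySem.List.enumerate_cons, PySem.Set.ofList_cons, List.filter_cons,
          List.filter_cons]
      by_cases hqa : q a = true
      · have hat : a ∉ t := by
          by_contra hmem
          have h1 := hq a hqa
          have h2 : 1 ≤ t.count a := List.one_le_count_iff.mpr hmem
          rw [List.count_cons] at h1
          simp at h1
          omega
        have hd : (PySem.Set.ofList t).discard a = PySem.Set.ofList t := by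
          simp only [PySem.Set.discard]
          apply List.filter_eq_self.mpr
          intro c hc
          have : c ∈ t := (PySem.Set.mem_ofList t c).mp hc
          simp
          rintro rfl
          exact hat this
        simp only [hqa, if_pos, hd, ih hq' (n + 1), List.map_cons]
        simp only [List.idxOf_cons, BEq.rfl, cond_true, Nat.cast_zero, add_zero]
        congr 1
        apply List.map_congr_left
        intro c hc
        have hct : c ∈ t := (PySem.Set.mem_ofList t c).mp (List.mem_filter.mp hc).1
        have hca : (a == c) = false := by
          apply beq_eq_false_iff_ne.mpr
          rintro rfl; exact hat hct
        simp only [hca, cond_false, Nat.cast_add, Nat.cast_one]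
        rw [Prod.mk.injEq]
        exact ⟨by ring, rfl⟩
      · simp only [Bool.not_eq_true] at hqa
        simp only [hqa, if_neg, Bool.false_eq_true, not_false_iff, ih hq' (n + 1)]
        have hd : List.filter q ((PySem.Set.ofList t).discard a)
            = List.filter q (PySem.Set.ofList t) := by
          simp only [PySem.Set.discard, List.filter_filter]
          apply List.filter_congr
          intro c _
          by_cases hc : c = a
          · subst hc; simp [hqa]
          · simp [beq_eq_false_iff_ne.mpr hc]
        rw [hd]
        apply List.map_congr_left
        intro c hc
        have hcq : q c = true := (List.mem_filter.mp hc).2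
        have hca : (a == c) = false := by
          apply beq_eq_false_iff_ne.mpr
          rintro rfl
          rw [hqa] at hcq; exact Bool.false_ne_true hcq
        simp only [List.idxOf_cons, hca, cond_false, Nat.cast_add, Nat.cast_one]
        rw [Prod.mk.injEq]
        exact ⟨by ring, rfl⟩

-- the common shape of both result loops
def genRun (all : Bool) (hits : List (Int × String)) (ret : PySem.Dict Int String) :
    PySem.Dict Int String :=
  match all, hits with
  | false, (i, s) :: _ => PySem.Dict.empty.insert i s
  | false, [] => ret
  | true, hits => hits.foldl (fun r p => r.insert p.1 p.2) ret

theorem loopA_eq (arr : List Char) (all : Bool) (l : List (Int × Char))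
    (ret : PySem.Dict Int String) :
    orderNoMatterLoop arr all l ret
    = genRun all ((l.filter (fun p => p.2 ∈ arr)).map
        (fun p => (p.1, String.ofList [p.2]))) ret := by
  induction l generalizing ret with
  | nil => cases all <;> rfl
  | cons p rest ih =>
      obtain ⟨i, c⟩ := p
      by_cases h : c ∈ arr
      · cases all with
        | false => simp [orderNoMatterLoop, h, genRun]
        | true => simp [orderNoMatterLoop, h, ih, genRun]
      · cases all with
        | false => simp [orderNoMatterLoop, h, ih]
        | true => simp [orderNoMatterLoop, h, ih]

theorem loopB_eq (all : Bool) (l : List (Char × (Int × Int)))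
    (ret : PySem.Dict Int String) :
    orderNoMatterAltLoop all l ret
    = genRun all ((l.filter (fun kv => kv.2.2 == 1)).map
        (fun kv => (kv.2.1, String.ofList [kv.1]))) ret := by
  induction l generalizing ret with
  | nil => cases all <;> rfl
  | cons p rest ih =>
      obtain ⟨c, idx, cnt⟩ := p
      by_cases h : cnt = 1
      · cases all with
        | false => simp [orderNoMatterAltLoop, h, genRun]
        | true => simp [orderNoMatterAltLoop, h, ih, genRun]
      · cases all with
        | false => simp [orderNoMatterAltLoop, h, ih]
        | true => simp [orderNoMatterAltLoop, h, ih]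

-- the two loops' hit lists coincide
theorem hitsEq (L : List Char) :
    (((PySem.List.enumerate L 0).filter (fun p =>
        p.2 ∈ (((PySem.Dict.counter L).items.filter (fun kv => kv.2 == 1)).map (·.1)))).map
      (fun p => (p.1, String.ofList [p.2])))
    = ((((PySem.Set.ofList L).map (fun c =>
          (c, ((0 + (L.idxOf c : Int)), (L.count c : Int))))).filter
            (fun kv => kv.2.2 == 1)).map (fun kv => (kv.2.1, String.ofList [kv.1]))) := by
  have harr : (((PySem.Dict.counter L).items.filter (fun kv => kv.2 == 1)).map (·.1))
      = (PySem.Set.ofList L).filter (fun c => L.count c == 1) := by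
    rw [PySem.Dict.items_counter, List.filter_map, List.map_map]
    simp only [Function.comp_def, List.map_id']
    apply List.filter_congr
    intro c _
    rw [Bool.eq_iff_iff, beq_iff_eq, beq_iff_eq, Nat.cast_eq_one]
  rw [harr]
  have hmem : ∀ p ∈ PySem.List.enumerate L 0,
      (decide (p.2 ∈ (PySem.Set.ofList L).filter (fun c => L.count c == 1)))
      = (L.count p.2 == 1) := by
    intro p hp
    have h2 : p.2 ∈ L := mem_snd_enumerate L 0 p hp
    cases hc : (L.count p.2 == 1) <;>
      simp [List.mem_filter, hc, PySem.Set.mem_ofList, h2]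
  rw [List.filter_congr hmem,
    enum_filter_eq L (fun c => L.count c == 1)
      (fun c hc => by rw [beq_iff_eq] at hc; omega) 0,
    List.map_map, List.filter_map, List.map_map]
  have hpred : ∀ c ∈ PySem.Set.ofList L,
      ((fun kv => kv.2.2 == 1) ∘ fun c => (c, (0 + (L.idxOf c : Int), (L.count c : Int)))) c
      = (L.count c == 1) := by
    intro c _
    simp only [Function.comp_def]
    rw [Bool.eq_iff_iff, beq_iff_eq, beq_iff_eq, Nat.cast_eq_one]
  rw [List.filter_congr hpred]
  simp only [Function.comp_def]

-- ===== VERDICT (by name: the statement is the Claim_ definition above) =====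
theorem orderNoMatter_spec : Claim_equal_orderNoMatter := by
  intro ss all _
  show orderNoMatter ss all = orderNoMatter_alt ss all
  simp only [orderNoMatter, orderNoMatter_alt]
  rw [dicA_eq, loopA_eq, loopB_eq,
    tableB_items ss.toList 0 PySem.Dict.empty PySem.Dict.nodup_keys_empty]
  simp only [show (PySem.Dict.empty : PySem.Dict Char (Int × Int)).items = [] from rfl,
    List.map_nil, List.nil_append, PySem.Dict.contains_empty, Bool.not_false,
    List.filter_true]
  rw [hitsEq ss.toList]
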